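-- pv_equiv track=rewrite | github.com/pypi-data/pypi-mirror-31 | packages/kopi/kopi-0.17.8-py3-none-any.whl/kopi/Bak_misc.py | InsertEscapeBeforeParenthesis
-- ===== SOURCE A (Python) =====
-- def InsertEscapeBeforeParenthesis(Text):
-- 	SplitText=Text.split(")")
-- 	for n in range(len(SplitText)-1):
-- 		SplitText[n] += "\\)"
-- 	Result="".join(SplitText)
--
-- 	SplitText=Result.split("(")
-- 	for n in range(len(SplitText)-1):
-- 		SplitText[n] += "\\("
-- 	Result="".join(SplitText)
-- 	return Result
-- ===== SOURCE B (Python) =====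
-- def InsertEscapeBeforeParenthesis(Text):
-- 	out = []
-- 	for c in Text:
-- 		if c == '(' or c == ')':
-- 			out.append('\\')
-- 		out.append(c)
-- 	return "".join(out)
-- ===== Notes on version B (the rewrite author's own statement) =====
-- stated objective: simpler
-- what changed: Replaces the two split/append/join passes (one per paren kind) with a single character loop that emits a backslash before '(' or ')' while copying the string once.
import Mathlib
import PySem

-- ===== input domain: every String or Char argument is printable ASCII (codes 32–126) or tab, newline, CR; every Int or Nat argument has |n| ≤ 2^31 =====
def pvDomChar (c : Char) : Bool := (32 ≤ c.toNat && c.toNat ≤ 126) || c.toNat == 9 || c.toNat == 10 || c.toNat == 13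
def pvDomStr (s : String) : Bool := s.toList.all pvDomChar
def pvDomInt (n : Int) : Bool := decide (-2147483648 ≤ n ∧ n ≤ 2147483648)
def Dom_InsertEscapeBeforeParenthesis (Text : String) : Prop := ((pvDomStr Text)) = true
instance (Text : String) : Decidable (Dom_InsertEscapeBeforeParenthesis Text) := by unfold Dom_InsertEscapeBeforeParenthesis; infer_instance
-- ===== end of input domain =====

-- B replaces A's two split/append/join passes by a single character-by-character pass
-- that emits a backslash before each parenthesis (objective: simpler).


-- ===== PORT A =====
-- One pass of A: split on the one-character separator p, append "\\"+p to every
-- part except the last (the range(len-1) loop, via List.modify at index n), join on "".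
def escPassA (s : List Char) (p : Char) : List Char :=
  PySem.Chars.join []
    ((PySem.List.pyRange 0 (((PySem.Chars.splitOn s [p]).length : Int) - 1) 1).foldl
      (fun st n => st.modify n.toNat (· ++ ['\\', p])) (PySem.Chars.splitOn s [p]))

def InsertEscapeBeforeParenthesis (Text : String) : String :=
  String.ofList (escPassA (escPassA Text.toList ')') '(')

-- ===== PORT B =====
def InsertEscapeBeforeParenthesis_alt (Text : String) : String :=
  String.ofList
    (Text.toList.foldl
      (fun out c => if c = '(' ∨ c = ')' then out ++ ['\\', c] else out ++ [c]) [])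

-- ===== PRECONDITION & SPEC =====
def Spec_InsertEscapeBeforeParenthesis (Text : String) (out : String) : Prop := out = InsertEscapeBeforeParenthesis_alt Text
instance (Text : String) (out : String) : Decidable (Spec_InsertEscapeBeforeParenthesis Text out) := by unfold Spec_InsertEscapeBeforeParenthesis; infer_instance

-- ===== CLAIM (what is proved, stated in full; the proofs are below) =====
def Claim_equal_InsertEscapeBeforeParenthesis : Prop := ∀ (Text : String), Dom_InsertEscapeBeforeParenthesis Text → Spec_InsertEscapeBeforeParenthesis Text (InsertEscapeBeforeParenthesis Text)

-- ===== LEMMAS AND PROOFS =====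

-- Reference split-on-one-char function for the proof.
def splitChar (p : Char) : List Char → List (List Char)
  | [] => [[]]
  | c :: rest =>
    if c = p then [] :: splitChar p rest
    else
      match splitChar p rest with
      | [] => [[c]]
      | h :: t => (c :: h) :: t

theorem splitChar_ne_nil (p : Char) (l : List Char) : splitChar p l ≠ [] := by
  cases l with
  | nil => simp [splitChar]
  | cons c rest =>
    simp only [splitChar]
    split_ifs
    · simp
    · cases h : splitChar p rest <;> simp

theorem go_spec (p : Char) : ∀ (fuel : Nat) (l cur : List Char) (acc : List (List Char)),
    l.length < fuel →
    PySem.Chars.splitOn.go [p] fuel l cur acc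
      = acc.reverse ++ (splitChar p l).modifyHead (cur.reverse ++ ·) := by
  intro fuel
  induction fuel with
  | zero => intro l cur acc h; omega
  | succ f ih =>
    intro l cur acc h
    cases l with
    | nil => simp [PySem.Chars.splitOn.go, splitChar]
    | cons c rest =>
      by_cases hc : c = p
      · subst hc
        have : ([c].isPrefixOf (c :: rest)) = true := by simp [List.isPrefixOf]
        rw [PySem.Chars.splitOn.go, if_pos this]
        simp only [List.length_cons, List.length_nil, List.drop_succ_cons, List.drop_zero]
        rw [ih rest [] (cur.reverse :: acc) (by simpa using Nat.lt_of_succ_lt_succ h)]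
        simp only [splitChar, List.reverse_cons,
          List.reverse_nil, List.nil_append, List.append_assoc]
        cases splitChar c rest <;> simp
      · have : ([p].isPrefixOf (c :: rest)) = false := by
          simp [List.isPrefixOf]
          exact fun hh => (hc hh.symm).elim
        rw [PySem.Chars.splitOn.go, if_neg (by simp [this])]
        rw [ih rest (c :: cur) acc (by simpa using Nat.lt_of_succ_lt_succ h)]
        have hne := splitChar_ne_nil p rest
        cases hsp : splitChar p rest with
        | nil => exact absurd hsp hne
        | cons h0 t0 => simp [splitChar, hc, hsp]

theorem splitOn_single (p : Char) (l : List Char) :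
    PySem.Chars.splitOn l [p] = splitChar p l := by
  rw [PySem.Chars.splitOn, go_spec p (l.length + 1) l [] [] (by omega)]
  have hne := splitChar_ne_nil p l
  cases hsp : splitChar p l with
  | nil => exact absurd hsp hne
  | cons h0 t0 => simp

theorem modify_append_len {α : Type} (l1 l2 : List α) (f : α → α) :
    (l1 ++ l2).modify l1.length f = l1 ++ l2.modify 0 f := by
  induction l1 with
  | nil => simp
  | cons a t ih => simpa [List.modify] using ih

theorem modify_append_len' {α : Type} (l1 l2 : List α) (f : α → α) {k : Nat}
    (h : l1.length = k) : (l1 ++ l2).modify k f = l1 ++ l2.modify 0 f := by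
  subst h; exact modify_append_len l1 l2 f

-- The append-to-all-but-last loop: foldl of modify over range 0..k-1.
theorem loop_modify (suf : List Char) :
    ∀ (k : Nat) (st : List (List Char)), k ≤ st.length →
    (PySem.List.pyRange 0 (k : Int) 1).foldl
        (fun st n => st.modify n.toNat (· ++ suf)) st
      = (st.take k).map (· ++ suf) ++ st.drop k := by
  intro k
  induction k with
  | zero => intro st _; simp [PySem.List.pyRange_one_eq_nil]
  | succ k ih =>
    intro st hk
    rw [show ((k + 1 : Nat) : Int) = (k : Int) + 1 by push_cast; ring,
        PySem.List.pyRange_one_succ_right (show (0:Int) ≤ (k:Int) by positivity),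
        List.foldl_append, ih st (by omega)]
    simp only [List.foldl_cons, List.foldl_nil, Int.toNat_natCast]
    have hlen : ((st.take k).map (· ++ suf)).length = k := by simp; omega
    rw [modify_append_len' _ _ _ hlen]
    have hd : st.drop k = st[k] :: st.drop (k + 1) := List.drop_eq_getElem_cons (by omega)
    rw [hd, List.modify_zero_cons,
        List.take_succ_eq_append_getElem (l := st) (i := k) (by omega)]
    simp only [List.map_append, List.map_cons, List.map_nil]
    simp
    rfl

-- Value of one A-pass, char-level: escape every occurrence of p.
def escChar (p : Char) (c : Char) : List Char := if c = p then ['\\', p] else [c]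

-- joinSuf: concatenate parts putting suf between consecutive parts
theorem join_esc (p : Char) : ∀ l : List Char,
    ((splitChar p l).dropLast.map (· ++ ['\\', p]) ++ (splitChar p l).drop ((splitChar p l).length - 1)).flatten
      = l.flatMap (escChar p) := by
  intro l
  induction l with
  | nil => simp [splitChar]
  | cons c rest ih =>
    have hne := splitChar_ne_nil p rest
    cases hsp : splitChar p rest with
    | nil => exact absurd hsp hne
    | cons h0 t0 =>
      by_cases hc : c = p
      · subst hc
        simp only [splitChar, hsp]
        rw [hsp] at ih
        cases t0 with
        | nil => simpa [escChar] using ih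
        | cons h1 t1 => simpa [escChar] using ih
      · simp only [splitChar, if_neg hc, hsp]
        rw [hsp] at ih
        cases t0 with
        | nil => simpa [escChar, hc] using ih
        | cons h1 t1 => simpa [escChar, hc] using ih

theorem join_nil_eq_flatten : ∀ parts : List (List Char), PySem.Chars.join [] parts = parts.flatten
  | [] => by simp [PySem.Chars.join, List.intercalate]
  | [a] => by simp [PySem.Chars.join, List.intercalate]
  | a :: b :: t => by
      have ih := join_nil_eq_flatten (b :: t)
      simp only [PySem.Chars.join, List.intercalate] at ih ⊢
      simp only [List.intersperse]
      simp [ih]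

theorem escPassA_eq (p : Char) (l : List Char) :
    escPassA l p = l.flatMap (escChar p) := by
  unfold escPassA
  rw [splitOn_single]
  have hne := splitChar_ne_nil p l
  have hlenpos : 1 ≤ (splitChar p l).length := by
    cases h : splitChar p l with
    | nil => exact absurd h hne
    | cons a b => simp
  have hcast : ((splitChar p l).length : Int) - 1 = (((splitChar p l).length - 1 : Nat) : Int) := by
    omega
  rw [hcast, loop_modify ['\\', p] ((splitChar p l).length - 1) (splitChar p l) (by omega)]
  have htake : (splitChar p l).take ((splitChar p l).length - 1) = (splitChar p l).dropLast := by
    rw [List.dropLast_eq_take]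
  rw [htake]
  rw [join_nil_eq_flatten]
  exact join_esc p l

theorem two_pass (l : List Char) :
    (l.flatMap (escChar ')')).flatMap (escChar '(') = l.flatMap (fun c => if c = '(' ∨ c = ')' then ['\\', c] else [c]) := by
  rw [List.flatMap_assoc]
  apply List.flatMap_congr
  intro c _
  by_cases h1 : c = '('
  · subst h1; simp [escChar]
  · by_cases h2 : c = ')'
    · subst h2; simp [escChar]
    · simp [escChar, h1, h2]

theorem alt_foldl_eq (l : List Char) :
    l.foldl (fun out c => if c = '(' ∨ c = ')' then out ++ ['\\', c] else out ++ [c]) []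
      = l.flatMap (fun c => if c = '(' ∨ c = ')' then ['\\', c] else [c]) := by
  suffices h : ∀ acc : List Char, l.foldl (fun out c => if c = '(' ∨ c = ')' then out ++ ['\\', c] else out ++ [c]) acc
      = acc ++ l.flatMap (fun c => if c = '(' ∨ c = ')' then ['\\', c] else [c]) from h []
  induction l with
  | nil => simp
  | cons c rest ih =>
    intro acc
    by_cases h : c = '(' ∨ c = ')' <;> simp [h, ih, List.append_assoc]

-- ===== VERDICT (by name: the statement is the Claim_ definition above) =====
theorem InsertEscapeBeforeParenthesis_spec : Claim_equal_InsertEscapeBeforeParenthesis := by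
  intro Text _
  unfold Spec_InsertEscapeBeforeParenthesis InsertEscapeBeforeParenthesis InsertEscapeBeforeParenthesis_alt
  rw [escPassA_eq, escPassA_eq, two_pass, alt_foldl_eq]
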